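-- pv_equiv track=rewrite | github.com/rslabon/aoc2016 | day14.py | contains_window
-- ===== SOURCE A (Python) =====
-- def contains_window(s, size):
--     start = 0
--     end = size
--     while end <= len(s):
--         window = s[start:end]
--         if len(set(window)) == 1:
--             return window[0]
--
--         start += 1
--         end += 1
--
--     return None
-- ===== SOURCE B (Python) =====
-- def contains_window(s, size):
--     run = 0
--     prev = None
--     for ch in s:
--         run = run + 1 if ch == prev else 1
--         prev = ch
--         if run >= size:
--             return ch
--     return None
-- ===== Notes on version B (the rewrite author's own statement) =====
-- stated objective: faster
-- what changed: Replaced the sliding-window scan that builds a set of each size-length window with a single pass over the string that tracks the length of the current run of equal characters, returning as soon as a run reaches size.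
-- outside the precondition, e.g. on contains_window('abc', -1): A returns None, B returns 'a'; on contains_window('a', 0): A returns None, B returns 'a'
import Mathlib
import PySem

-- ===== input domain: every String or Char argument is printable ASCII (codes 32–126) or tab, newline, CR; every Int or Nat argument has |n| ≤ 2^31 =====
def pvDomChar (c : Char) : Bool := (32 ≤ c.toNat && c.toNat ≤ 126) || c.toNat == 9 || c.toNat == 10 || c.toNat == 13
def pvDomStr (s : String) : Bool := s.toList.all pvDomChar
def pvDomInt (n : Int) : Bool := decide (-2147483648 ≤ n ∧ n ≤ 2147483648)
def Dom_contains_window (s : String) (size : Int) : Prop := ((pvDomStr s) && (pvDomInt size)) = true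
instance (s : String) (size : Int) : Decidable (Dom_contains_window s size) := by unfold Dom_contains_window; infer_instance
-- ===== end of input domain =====

-- B replaces A's per-window set construction by a single pass tracking the current
-- run length of equal characters (objective: faster; measured).

-- ===== PORT A =====
-- while end <= len(s): window = s[start:end]; if len(set(window)) == 1: return window[0]; start += 1; end += 1
def containsLoopA (s : String) (start fin : Int) : Option String :=
  if h : fin ≤ PySem.Str.len s then
    let window := PySem.Str.slice s (some start) (some fin)
    if PySem.Set.len (PySem.Set.ofList window.toList) = 1 then
      (PySem.Str.pyGet? window 0).map (fun c => String.ofList [c])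
    else containsLoopA s (start + 1) (fin + 1)
  else none
termination_by (PySem.Str.len s + 1 - fin).toNat
decreasing_by simp [PySem.Str.len] at h ⊢; omega


def contains_window (s : String) (size : Int) : Option String :=
  containsLoopA s 0 size

-- ===== PORT B =====
-- run = 0; prev = None; for ch in s: run = run+1 if ch == prev else 1; prev = ch; if run >= size: return ch
def altLoopB (size : Int) : List Char → Int → Option Char → Option String
  | [], _, _ => none
  | c :: cs, run, prev =>
    let run' : Int := if prev == some c then run + 1 else 1
    if size ≤ run' then some (String.ofList [c])
    else altLoopB size cs run' (some c)

def contains_window_alt (s : String) (size : Int) : Option String :=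
  altLoopB size s.toList 0 none

-- ===== PRECONDITION & SPEC =====
-- Pre_ restricts to the natural domain size ≥ 1: for size ≤ 0 (a nonsensical window
-- length) A's behaviour is an accident of Python's negative slicing.
def Pre_contains_window (s : String) (size : Int) : Prop := 1 ≤ size
instance (s : String) (size : Int) : Decidable (Pre_contains_window s size) := by unfold Pre_contains_window; infer_instance
def pvWitness_contains_window : String × Int := ("aabba", 2)

def Spec_contains_window (s : String) (size : Int) (out : Option String) : Prop := out = contains_window_alt s size
instance (s : String) (size : Int) (out : Option String) : Decidable (Spec_contains_window s size out) := by unfold Spec_contains_window; infer_instance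

-- ===== CLAIM (what is proved, stated in full; the proofs are below) =====
def Claim_equal_contains_window : Prop := ∀ (s : String) (size : Int), Dom_contains_window s size → Pre_contains_window s size → Spec_contains_window s size (contains_window s size)

-- ===== LEMMAS AND PROOFS =====

-- Proof-side normal form: A's scan rewritten as structural recursion on the suffix list.
def asimp (n : Nat) : List Char → Option String
  | [] => none
  | c :: cs =>
    if n ≤ (c :: cs).length then
      if PySem.Set.len (PySem.Set.ofList ((c :: cs).take n)) = 1 then some (String.ofList [c])
      else asimp n cs
    else none

theorem asimp_short {n : Nat} {w : List Char} (h : w.length < n) : asimp n w = none := by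
  cases w with
  | nil => rfl
  | cons c cs =>
    simp only [asimp, List.length_cons]
    rw [if_neg (by simp at h; omega)]

theorem set_ofList_replicate (k : Nat) (p : Char) (hk : 1 ≤ k) :
    PySem.Set.ofList (List.replicate k p) = [p] := by
  induction k with
  | zero => omega
  | succ k ih =>
    cases Nat.eq_or_lt_of_le hk with
    | inl h => simp [← h]; rfl
    | inr h =>
      rw [List.replicate_succ, PySem.Set.ofList_cons, ih (by omega)]
      simp [PySem.Set.discard]

theorem set_len_ne_one {w : List Char} {p c : Char} (hp : p ∈ w) (hc : c ∈ w) (hne : p ≠ c) :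
    ¬ PySem.Set.len (PySem.Set.ofList w) = 1 := by
  intro h
  have hp' : p ∈ PySem.Set.ofList w := (PySem.Set.mem_ofList _ _).2 hp
  have hc' : c ∈ PySem.Set.ofList w := (PySem.Set.mem_ofList _ _).2 hc
  have hlen : (PySem.Set.ofList w).length = 1 := by simpa [PySem.Set.len] using h
  obtain ⟨x, hx⟩ := List.length_eq_one_iff.1 hlen
  rw [hx] at hp' hc'
  simp at hp' hc'
  exact hne (hp'.trans hc'.symm)

-- A's loop equals asimp on the dropped suffix.
theorem loopA_eq_asimp (s : String) (size : Int) (hsz : 1 ≤ size) :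
    ∀ (m : Nat) (start : Int), 0 ≤ start → s.toList.length ≤ start.toNat + m →
      containsLoopA s start (start + size) = asimp size.toNat (s.toList.drop start.toNat) := by
  intro m
  induction m with
  | zero =>
    intro start h0 hm
    rw [containsLoopA, dif_neg (by simp [PySem.Str.len, -String.length_toList]; omega)]
    rw [List.drop_of_length_le (by omega)]
    rfl
  | succ m ih =>
    intro start h0 hm
    by_cases hend : start + size ≤ (s.toList.length : Int)
    · rw [containsLoopA, dif_pos (by simp [PySem.Str.len, -String.length_toList]; omega)]
      have hlt : start.toNat < s.toList.length := by omega
      obtain ⟨c, cs, hdrop⟩ : ∃ c cs, s.toList.drop start.toNat = c :: cs := by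
        cases hd : s.toList.drop start.toNat with
        | nil => exact absurd (List.drop_eq_nil_iff.mp hd) (by omega)
        | cons c cs => exact ⟨c, cs, rfl⟩
      have hwin : (PySem.Str.slice s (some start) (some (start + size))).toList
          = (c :: cs).take size.toNat := by
        rw [PySem.Str.toList_slice, PySem.Chars.slice_eq_listSlice, PySem.List.slice_toNat _ h0 (by omega), ← hdrop]
        congr 1
        omega
      have hlen : s.toList.length = start.toNat + (c :: cs).length := by
        have := List.length_drop (l := s.toList) (i := start.toNat)
        rw [hdrop] at this; omega
      have hc1 : size.toNat ≤ (c :: cs).length := by omega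
      rw [hdrop, asimp, if_pos hc1]
      have htake : (c :: cs).take size.toNat = c :: cs.take (size.toNat - 1) := by
        have h' : size.toNat = (size.toNat - 1) + 1 := by omega
        conv_lhs => rw [h', List.take_succ_cons]
      by_cases hone : PySem.Set.len (PySem.Set.ofList ((c :: cs).take size.toNat)) = 1
      · have honeW : PySem.Set.len (PySem.Set.ofList
            (PySem.Str.slice s (some start) (some (start + size))).toList) = 1 := by
          rw [hwin]; exact hone
        rw [if_pos honeW, if_pos hone]
        have hg : (PySem.Str.slice s (some start) (some (start + size))).toList
            = c :: cs.take (size.toNat - 1) := by rw [hwin, htake]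
        simp [PySem.Str.pyGet?, hg]
      · have honeW : ¬ PySem.Set.len (PySem.Set.ofList
            (PySem.Str.slice s (some start) (some (start + size))).toList) = 1 := by
          rw [hwin]; exact hone
        rw [if_neg honeW, if_neg hone]
        have harg : start + size + 1 = (start + 1) + size := by ring
        rw [harg, ih (start + 1) (by omega) (by omega)]
        congr 1
        have h1 : (start + 1).toNat = start.toNat + 1 := by omega
        rw [h1, ← List.drop_drop, hdrop]
        rfl
    · rw [containsLoopA, dif_neg (by simp [PySem.Str.len, -String.length_toList]; omega)]
      rw [asimp_short]
      rw [List.length_drop]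
      omega

theorem asimp_run_skip {n : Nat} {p c : Char} (hne : c ≠ p) (cs : List Char) :
    ∀ j, j < n → asimp n (List.replicate j p ++ c :: cs) = asimp n (c :: cs)
  | 0, _ => by simp
  | (j+1), hj => by
    rw [List.replicate_succ, List.cons_append, asimp]
    by_cases hlen : n ≤ (p :: (List.replicate j p ++ c :: cs)).length
    · rw [if_pos hlen, if_neg, asimp_run_skip hne cs j (by omega)]
      have hn1 : 1 ≤ n := by omega
      apply set_len_ne_one (p := p) (c := c) ?_ ?_ (fun h => hne h.symm)
      · have : n = (n - 1) + 1 := by omega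
        rw [this, List.take_succ_cons]
        exact List.mem_cons_self
      · rw [List.take_cons (by omega), List.take_append]
        apply List.mem_cons_of_mem
        apply List.mem_append_right
        have : (n - 1) - (List.replicate j p).length = ((n - 1) - j - 1) + 1 := by
          simp; omega
        rw [this, List.take_succ_cons]
        exact List.mem_cons_self
    · rw [if_neg hlen, asimp_short]
      simp at hlen ⊢
      omega

theorem altB_eq_asimp (size : Int) (hsz : 1 ≤ size) :
    ∀ (rest : List Char) (r : Nat) (p : Char), 1 ≤ r → (r : Int) < size →
      altLoopB size rest (r : Int) (some p) = asimp size.toNat (List.replicate r p ++ rest) := by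
  intro rest
  induction rest with
  | nil =>
    intro r p hr1 hrs
    rw [List.append_nil, asimp_short (by simp; omega)]
    rfl
  | cons c cs ih =>
    intro r p hr1 hrs
    have hsn : ((size.toNat : Int)) = size := Int.toNat_of_nonneg (by omega)
    rw [altLoopB]
    by_cases hc : p = c
    · subst hc
      simp only [BEq.rfl, if_true]
      by_cases hfin : size ≤ (r : Int) + 1
      · rw [if_pos hfin]
        have hreq : r + 1 = size.toNat := by omega
        have hl : List.replicate r p ++ p :: cs = List.replicate (r + 1) p ++ cs := by
          rw [List.replicate_succ', List.append_assoc]; rfl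
        rw [hl, List.replicate_succ, List.cons_append, asimp]
        have hlen2 : size.toNat ≤ (p :: (List.replicate r p ++ cs)).length := by
          simp; omega
        rw [if_pos hlen2, if_pos]
        have htake : (p :: (List.replicate r p ++ cs)).take size.toNat
            = List.replicate size.toNat p := by
          rw [← List.cons_append, ← List.replicate_succ, hreq]
          simp
        rw [htake, set_ofList_replicate _ _ (by omega)]
        rfl
      · rw [if_neg hfin]
        have hih := ih (r + 1) p (by omega)
        push_cast at hih
        rw [hih (by omega)]
        congr 1
        rw [List.replicate_succ', List.append_assoc]; rfl
    · have hbeq : (some p == some c) = false := by simp [hc]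
      simp only [hbeq, if_false, Bool.false_eq_true]
      have hn2 : ¬ (size ≤ (1 : Int)) := by omega
      rw [if_neg hn2]
      have hne : c ≠ p := fun h => hc h.symm
      have h1 := ih 1 c le_rfl
      push_cast at h1
      rw [h1 (by omega), asimp_run_skip hne cs r (by omega)]
      rfl

theorem alt_eq_asimp (s : String) (size : Int) (hsz : 1 ≤ size) :
    contains_window_alt s size = asimp size.toNat s.toList := by
  unfold contains_window_alt
  cases hl : s.toList with
  | nil => rfl
  | cons c cs =>
    rw [altLoopB]
    have hbeq : ((none : Option Char) == some c) = false := by rfl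
    simp only [hbeq, if_false, Bool.false_eq_true]
    by_cases h1 : size ≤ (1 : Int)
    · rw [if_pos h1]
      have hone : size.toNat = 1 := by omega
      rw [asimp, if_pos (by simp only [List.length_cons]; omega), if_pos]
      rw [hone, show (c :: cs).take 1 = List.replicate 1 c by simp,
        set_ofList_replicate 1 c le_rfl]
      rfl
    · rw [if_neg h1]
      have h2 := altB_eq_asimp size hsz cs 1 c le_rfl (by push_cast; omega)
      push_cast at h2
      rw [h2]
      rfl

-- ===== VERDICT (by name: the statement is the Claim_ definition above) =====
theorem contains_window_spec : Claim_equal_contains_window := by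
  intro s size _ hpre
  unfold Spec_contains_window contains_window
  have := loopA_eq_asimp s size hpre (s.toList.length) 0 le_rfl (by simp)
  rw [alt_eq_asimp s size hpre]
  simpa using this
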